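-- pv_equiv track=rewrite | github.com/Quimani-dot-py/app_sample | sample.py | stringCut
-- ===== SOURCE A (Python) =====
-- def stringCut(string):
--     count = 0
--     result = []
--     for letter in string:
--         count += 1
--         if count == 3:
--             result.append(letter)
--             count = 0
--     return "".join(result)
-- ===== SOURCE B (Python) =====
-- def stringCut(string):
--     return string[2::3]
-- ===== Notes on version B (the rewrite author's own statement) =====
-- stated objective: idiomatic
-- what changed: Replaces the counter-and-accumulator loop with a single extended slice string[2::3] that selects every third character in one native stride.
import Mathlib
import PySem

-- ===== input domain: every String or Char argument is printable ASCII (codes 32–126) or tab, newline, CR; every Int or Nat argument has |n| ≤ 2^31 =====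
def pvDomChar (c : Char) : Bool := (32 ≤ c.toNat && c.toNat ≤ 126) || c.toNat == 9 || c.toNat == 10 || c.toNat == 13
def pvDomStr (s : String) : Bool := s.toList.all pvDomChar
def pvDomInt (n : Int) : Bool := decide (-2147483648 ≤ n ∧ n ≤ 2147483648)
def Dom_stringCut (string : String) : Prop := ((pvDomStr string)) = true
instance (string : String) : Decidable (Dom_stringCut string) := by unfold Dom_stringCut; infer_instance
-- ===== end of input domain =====

-- B replaces A's counter loop with the extended slice string[2::3]; same return value, selected in one stride.

-- ===== PORT A =====
-- the for-loop of A, carrying its two loop variables (count, result)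
def stringCutLoop (chars : List Char) (count : Int) (result : List Char) : List Char :=
  match chars with
  | [] => result
  | letter :: rest =>
    let count' := count + 1
    if count' = 3 then stringCutLoop rest 0 (result ++ [letter])
    else stringCutLoop rest count' result

def stringCut (string : String) : String :=
  String.ofList (stringCutLoop string.toList 0 [])

-- ===== PORT B =====
-- Source B: return string[2::3]; the step is the literal 3 ≠ 0, so the slice always yields a value
def stringCut_alt (string : String) : String :=
  (PySem.Str.slice? string (some 2) none 3).getD ""

-- ===== PRECONDITION & SPEC =====
def Spec_stringCut (string : String) (out : String) : Prop := out = stringCut_alt string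
instance (string : String) (out : String) : Decidable (Spec_stringCut string out) := by unfold Spec_stringCut; infer_instance

-- ===== CLAIM (what is proved, stated in full; the proofs are below) =====
def Claim_equal_stringCut : Prop := ∀ (string : String), Dom_stringCut string → Spec_stringCut string (stringCut string)

-- ===== LEMMAS AND PROOFS =====

-- every third element (indices 2, 5, 8, …) of a list
def pick3 : List Char → List Char
  | [] => []
  | [_] => []
  | [_, _] => []
  | _ :: _ :: c :: r => c :: pick3 r

lemma loop_eq_pick3 (xs : List Char) : ∀ acc, stringCutLoop xs 0 acc = acc ++ pick3 xs := by
  induction xs using pick3.induct with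
  | case1 => intro acc; simp [stringCutLoop, pick3]
  | case2 a => intro acc; simp [stringCutLoop, pick3]
  | case3 a b => intro acc; simp [stringCutLoop, pick3]
  | case4 a b c r ih =>
    intro acc
    simp [stringCutLoop, pick3, ih]

lemma slice3_eq_pick3 (xs : List Char) :
    PySem.List.slice? xs (some 2) none 3 = some (pick3 xs) := by
  induction xs using pick3.induct with
  | case1 => rfl
  | case2 a => rfl
  | case3 a b => rfl
  | case4 a b c r ih =>
    simp only [PySem.List.slice?, PySem.List.sliceIndices] at ih ⊢
    norm_num at ih ⊢
    have hc1 : (if 2 < r.length then (((r.length:Int) - min 2 ((r.length:Int)) + 3 - 1) / 3).toNat else 0) = r.length / 3 := by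
      split_ifs with h <;> omega
    rw [hc1] at ih
    have hc2 : (if (2:Int) ≤ (r.length:Int) + 1 + 1 then (((r.length:Int) + 1 + 1 + 1 - min (2:Int) ((r.length:Int) + 1 + 1 + 1) + 3 - 1) / 3).toNat else 0) = r.length / 3 + 1 := by
      split_ifs with h <;> omega
    rw [hc2, List.range_succ_eq_map, List.filterMap_cons, List.filterMap_map]
    have hmin : min (2:Int) ((r.length:Int) + 1 + 1 + 1) = 2 := by omega
    rw [hmin]
    norm_num
    have h2 : (a::b::c::r)[Int.toNat 2]? = some c := rfl
    simp only [h2, pick3]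
    rw [← ih]
    refine congrArg (c :: ·) ?_
    apply List.filterMap_congr
    intro x hx
    simp only [List.mem_range] at hx
    have hlen : 3 ≤ r.length := by omega
    have hm2 : min (2:Int) ((r.length:Int)) = 2 := by omega
    rw [hm2, show ((2:Int)+3*((x:Int)+1)).toNat = ((2:Int)+3*(x:Int)).toNat + 1 + 1 + 1 from by omega]
    simp [List.getElem?_cons_succ]

-- ===== VERDICT (by name: the statement is the Claim_ definition above) =====
theorem stringCut_spec : Claim_equal_stringCut := by
  intro s _
  show _ = _
  unfold stringCut stringCut_alt
  rw [loop_eq_pick3, List.nil_append, PySem.Str.slice?]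
  rw [PySem.Chars.slice?_eq_listSlice?, slice3_eq_pick3]
  rfl
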